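-- pv_equiv track=rewrite | github.com/beloureiro/AI-CAC-V1.3 | LmStudio/Rag_bot/main.py | filter_context_based_on_expert
-- ===== SOURCE A (Python) =====
-- def filter_context_based_on_expert(query, context_chunks):
--     """
--     Filters context chunks based on which expert is being referenced in the query.
--     This ensures that only relevant context is passed to the LLM.
--
--     :param query: The user's query which may reference a specific expert.
--     :param context_chunks: The full set of context chunks retrieved.
--     :return: A list of context chunks relevant to the expert mentioned in the query.
--     """
--     expert_map = {
--         "PatientExperienceExpert": [],
--         "HealthITProcessExpert": [],
--         "ClinicalPsychologist": [],
--         "CommunicationExpert": [],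
--         "ManagerAndAdvisor": []
--     }
--
--     # Organize context chunks by expert
--     for chunk in context_chunks:
--         if "PatientExperienceExpert" in chunk:
--             expert_map["PatientExperienceExpert"].append(chunk)
--         elif "HealthITProcessExpert" in chunk:
--             expert_map["HealthITProcessExpert"].append(chunk)
--         elif "ClinicalPsychologist" in chunk:
--             expert_map["ClinicalPsychologist"].append(chunk)
--         elif "CommunicationExpert" in chunk:
--             expert_map["CommunicationExpert"].append(chunk)
--         elif "ManagerAndAdvisor" in chunk:
--             expert_map["ManagerAndAdvisor"].append(chunk)
--
--     # If the query refers to a specific expert, return their relevant context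
--     for expert, chunks in expert_map.items():
--         if expert.lower() in query.lower():
--             return chunks
--
--     # If no specific expert is referenced, return all context chunks
--     return context_chunks
-- ===== SOURCE B (Python) =====
-- EXPERTS = [
--     "PatientExperienceExpert",
--     "HealthITProcessExpert",
--     "ClinicalPsychologist",
--     "CommunicationExpert",
--     "ManagerAndAdvisor",
-- ]
--
--
-- def _first_expert(chunk):
--     """First expert name (in fixed priority order) occurring in chunk, or None."""
--     for e in EXPERTS:
--         if e in chunk:
--             return e
--     return None
--
--
-- def filter_context_based_on_expert(query, context_chunks):
--     q = query.lower()
--     target = next((e for e in EXPERTS if e.lower() in q), None)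
--     if target is None:
--         return context_chunks
--     return [c for c in context_chunks if _first_expert(c) == target]
-- ===== Notes on version B (the rewrite author's own statement) =====
-- stated objective: simpler
-- what changed: Instead of pre-grouping all chunks into a five-list dict and then picking one bucket, B first finds the referenced expert from the query and makes a single filtering pass keeping chunks whose first matching expert (same priority order) is that target; no grouping structure is built.
import Mathlib
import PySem

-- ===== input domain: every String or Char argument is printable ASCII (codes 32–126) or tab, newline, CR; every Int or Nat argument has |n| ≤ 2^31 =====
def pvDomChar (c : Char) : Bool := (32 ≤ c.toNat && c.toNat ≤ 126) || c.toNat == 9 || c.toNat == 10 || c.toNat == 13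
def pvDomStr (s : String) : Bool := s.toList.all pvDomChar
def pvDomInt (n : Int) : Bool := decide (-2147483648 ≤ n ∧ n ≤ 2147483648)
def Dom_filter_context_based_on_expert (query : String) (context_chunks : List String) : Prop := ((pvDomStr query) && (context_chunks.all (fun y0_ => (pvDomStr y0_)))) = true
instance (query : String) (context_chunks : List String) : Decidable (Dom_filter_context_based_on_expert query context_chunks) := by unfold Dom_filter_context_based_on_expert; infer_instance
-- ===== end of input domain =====

-- B replaces A's group-all-chunks-into-a-dict-then-pick-a-bucket with a query-first
-- target lookup and one filtering pass (objective: simpler). Same return value everywhere.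

-- ===== PORT A =====
-- A's expert_map is a dict with five fixed literal keys whose values are the five
-- chunk buckets; ported as a 5-tuple of lists, appended to in the same elif order.
def pvStepA (st : List String × List String × List String × List String × List String)
    (chunk : String) : List String × List String × List String × List String × List String :=
  if PySem.Str.isIn "PatientExperienceExpert" chunk then
    (st.1 ++ [chunk], st.2.1, st.2.2.1, st.2.2.2.1, st.2.2.2.2)
  else if PySem.Str.isIn "HealthITProcessExpert" chunk then
    (st.1, st.2.1 ++ [chunk], st.2.2.1, st.2.2.2.1, st.2.2.2.2)
  else if PySem.Str.isIn "ClinicalPsychologist" chunk then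
    (st.1, st.2.1, st.2.2.1 ++ [chunk], st.2.2.2.1, st.2.2.2.2)
  else if PySem.Str.isIn "CommunicationExpert" chunk then
    (st.1, st.2.1, st.2.2.1, st.2.2.2.1 ++ [chunk], st.2.2.2.2)
  else if PySem.Str.isIn "ManagerAndAdvisor" chunk then
    (st.1, st.2.1, st.2.2.1, st.2.2.2.1, st.2.2.2.2 ++ [chunk])
  else st

def filter_context_based_on_expert (query : String) (context_chunks : List String) : List String :=
  let m := context_chunks.foldl pvStepA ([], [], [], [], [])
  let q := PySem.Str.lower query
  -- final loop over expert_map.items() in insertion order, returning the first hit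
  if PySem.Str.isIn (PySem.Str.lower "PatientExperienceExpert") q then m.1
  else if PySem.Str.isIn (PySem.Str.lower "HealthITProcessExpert") q then m.2.1
  else if PySem.Str.isIn (PySem.Str.lower "ClinicalPsychologist") q then m.2.2.1
  else if PySem.Str.isIn (PySem.Str.lower "CommunicationExpert") q then m.2.2.2.1
  else if PySem.Str.isIn (PySem.Str.lower "ManagerAndAdvisor") q then m.2.2.2.2
  else context_chunks

-- ===== PORT B =====
def pvExperts : List String :=
  ["PatientExperienceExpert", "HealthITProcessExpert", "ClinicalPsychologist",
   "CommunicationExpert", "ManagerAndAdvisor"]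

def pvFirstExpert (chunk : String) : Option String :=
  pvExperts.find? (fun e => PySem.Str.isIn e chunk)

def filter_context_based_on_expert_alt (query : String) (context_chunks : List String) : List String :=
  let q := PySem.Str.lower query
  match pvExperts.find? (fun e => PySem.Str.isIn (PySem.Str.lower e) q) with
  | none => context_chunks
  | some t => context_chunks.filter (fun c => pvFirstExpert c == some t)

-- ===== PRECONDITION & SPEC =====
def Spec_filter_context_based_on_expert (query : String) (context_chunks : List String) (out : List String) : Prop := out = filter_context_based_on_expert_alt query context_chunks
instance (query : String) (context_chunks : List String) (out : List String) : Decidable (Spec_filter_context_based_on_expert query context_chunks out) := by unfold Spec_filter_context_based_on_expert; infer_instance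

-- ===== CLAIM (what is proved, stated in full; the proofs are below) =====
def Claim_equal_filter_context_based_on_expert : Prop := ∀ (query : String) (context_chunks : List String), Dom_filter_context_based_on_expert query context_chunks → Spec_filter_context_based_on_expert query context_chunks (filter_context_based_on_expert query context_chunks)


-- ===== LEMMAS AND PROOFS =====


-- A's grouping fold computes, in each component, the chunks whose FIRST matching
-- expert (in the fixed priority order) is that component's expert.
theorem foldA_eq (l : List String) (a b c d e : List String) :
    l.foldl pvStepA (a, b, c, d, e) =
      (a ++ l.filter (fun ch => pvFirstExpert ch == some "PatientExperienceExpert"),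
       b ++ l.filter (fun ch => pvFirstExpert ch == some "HealthITProcessExpert"),
       c ++ l.filter (fun ch => pvFirstExpert ch == some "ClinicalPsychologist"),
       d ++ l.filter (fun ch => pvFirstExpert ch == some "CommunicationExpert"),
       e ++ l.filter (fun ch => pvFirstExpert ch == some "ManagerAndAdvisor")) := by
  induction l generalizing a b c d e with
  | nil => simp
  | cons ch tl ih =>
      rw [List.foldl_cons]
      by_cases h1 : PySem.Str.isIn "PatientExperienceExpert" ch = true
      · have hfe : pvFirstExpert ch = some "PatientExperienceExpert" := by
          simp only [pvFirstExpert, pvExperts, List.find?, h1]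
        simp only [pvStepA, h1]
        simp [ih, hfe]
      · rw [Bool.not_eq_true] at h1
        by_cases h2 : PySem.Str.isIn "HealthITProcessExpert" ch = true
        · have hfe : pvFirstExpert ch = some "HealthITProcessExpert" := by
            simp only [pvFirstExpert, pvExperts, List.find?, h1, h2]
          simp only [pvStepA, h1, h2]
          simp [ih, hfe]
        · rw [Bool.not_eq_true] at h2
          by_cases h3 : PySem.Str.isIn "ClinicalPsychologist" ch = true
          · have hfe : pvFirstExpert ch = some "ClinicalPsychologist" := by
              simp only [pvFirstExpert, pvExperts, List.find?, h1, h2, h3]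
            simp only [pvStepA, h1, h2, h3]
            simp [ih, hfe]
          · rw [Bool.not_eq_true] at h3
            by_cases h4 : PySem.Str.isIn "CommunicationExpert" ch = true
            · have hfe : pvFirstExpert ch = some "CommunicationExpert" := by
                simp only [pvFirstExpert, pvExperts, List.find?, h1, h2, h3, h4]
              simp only [pvStepA, h1, h2, h3, h4]
              simp [ih, hfe]
            · rw [Bool.not_eq_true] at h4
              by_cases h5 : PySem.Str.isIn "ManagerAndAdvisor" ch = true
              · have hfe : pvFirstExpert ch = some "ManagerAndAdvisor" := by
                  simp only [pvFirstExpert, pvExperts, List.find?, h1, h2, h3, h4, h5]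
                simp only [pvStepA, h1, h2, h3, h4, h5]
                simp [ih, hfe]
              · rw [Bool.not_eq_true] at h5
                have hfe : pvFirstExpert ch = none := by
                  simp only [pvFirstExpert, pvExperts, List.find?, h1, h2, h3, h4, h5]
                simp only [pvStepA, h1, h2, h3, h4, h5]
                simp [ih, hfe]

-- ===== VERDICT (by name: the statement is the Claim_ definition above) =====
theorem filter_context_based_on_expert_spec : Claim_equal_filter_context_based_on_expert := by
  intro query context_chunks _
  unfold Spec_filter_context_based_on_expert filter_context_based_on_expert
    filter_context_based_on_expert_alt
  by_cases q1 : PySem.Str.isIn (PySem.Str.lower "PatientExperienceExpert") (PySem.Str.lower query) = true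
  · simp only [pvExperts, List.find?, q1]
    simp [foldA_eq]
  · rw [Bool.not_eq_true] at q1
    by_cases q2 : PySem.Str.isIn (PySem.Str.lower "HealthITProcessExpert") (PySem.Str.lower query) = true
    · simp only [pvExperts, List.find?, q1, q2]
      simp [foldA_eq]
    · rw [Bool.not_eq_true] at q2
      by_cases q3 : PySem.Str.isIn (PySem.Str.lower "ClinicalPsychologist") (PySem.Str.lower query) = true
      · simp only [pvExperts, List.find?, q1, q2, q3]
        simp [foldA_eq]
      · rw [Bool.not_eq_true] at q3
        by_cases q4 : PySem.Str.isIn (PySem.Str.lower "CommunicationExpert") (PySem.Str.lower query) = true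
        · simp only [pvExperts, List.find?, q1, q2, q3, q4]
          simp [foldA_eq]
        · rw [Bool.not_eq_true] at q4
          by_cases q5 : PySem.Str.isIn (PySem.Str.lower "ManagerAndAdvisor") (PySem.Str.lower query) = true
          · simp only [pvExperts, List.find?, q1, q2, q3, q4, q5]
            simp [foldA_eq]
          · rw [Bool.not_eq_true] at q5
            simp only [pvExperts, List.find?, q1, q2, q3, q4, q5]
            simp
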